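-- pv_equiv track=rewrite | github.com/cupplesm77/LearningPython | Courseware-TDD/labs/splitting.py | split_amount
-- ===== SOURCE A (Python) =====
-- def split_amount(amount, n):
--     portion, remain = amount // n, amount % n
--     portions = []
--     for i in range(n):
--         portions.append(portion)
--         if remain >= 1:
--             portions[-1] += 1
--             remain -= 1
--     return portions
-- ===== SOURCE B (Python) =====
-- def split_amount(amount, n):
--     portions = []
--     while n > 0:
--         first = -(-amount // n)  # ceiling division: the fair share for the first remaining portion
--         portions.append(first)
--         amount -= first
--         n -= 1
--     return portions
-- ===== Notes on version B (the rewrite author's own statement) =====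
-- stated objective: alternative
-- what changed: Replaces the divmod-then-distribute loop (append the fixed quotient, bump while the precomputed remainder lasts) by a loop that at each step peels off the ceiling division -(-amount//n) as the next portion and shrinks amount and n, never computing a quotient/remainder pair.
import Mathlib
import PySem

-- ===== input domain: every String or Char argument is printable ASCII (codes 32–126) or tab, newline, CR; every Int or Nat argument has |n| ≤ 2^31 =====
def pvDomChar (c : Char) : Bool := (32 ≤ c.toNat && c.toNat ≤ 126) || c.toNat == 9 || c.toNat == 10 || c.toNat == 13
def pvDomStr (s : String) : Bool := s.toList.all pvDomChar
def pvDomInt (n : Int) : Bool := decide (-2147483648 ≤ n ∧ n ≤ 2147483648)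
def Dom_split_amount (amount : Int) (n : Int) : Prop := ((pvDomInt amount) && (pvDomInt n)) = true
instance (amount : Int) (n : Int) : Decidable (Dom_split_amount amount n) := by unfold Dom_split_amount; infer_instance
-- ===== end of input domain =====

-- B replaces A's divmod-then-distribute loop by a loop that peels off each portion as a
-- ceiling division of the remaining amount by the remaining count (objective: alternative).

-- ===== PORT A =====
-- one loop iteration: append portion; if remain >= 1 then portions[-1] += 1 and remain -= 1.
-- The growing list is kept REVERSED (head = Python's portions[-1]) so each step is O(1);
-- split_amount reverses it once at the end — the same appends and bumps, step for step.
def splitStepA (portion : Int) (st : List Int × Int) : List Int × Int :=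
  let rev := portion :: st.1
  if st.2 ≥ 1 then ((rev.headD 0 + 1) :: rev.tail, st.2 - 1)
  else (rev, st.2)

def split_amount (amount : Int) (n : Int) : List Int :=
  let portion := PySem.Int.floordiv amount n
  let remain := PySem.Int.mod amount n
  ((PySem.List.pyRange 0 n 1).foldl (fun st _ => splitStepA portion st) ([], remain)).1.reverse

-- ===== PORT B =====
-- B's while loop; the accumulator keeps Python's `portions` REVERSED (append = cons) and is
-- reversed once on exit.
def splitLoopB (amount : Int) (n : Int) (acc : List Int) : List Int :=
  if n ≤ 0 then acc.reverse
  else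
    let first := -(PySem.Int.floordiv (-amount) n)
    splitLoopB (amount - first) (n - 1) (first :: acc)
termination_by n.toNat
decreasing_by simp only [not_le] at *; omega

def split_amount_alt (amount : Int) (n : Int) : List Int :=
  splitLoopB amount n []

-- ===== PRECONDITION & SPEC =====
-- Pre_ excludes exactly n = 0, where Python A raises ZeroDivisionError.
def Pre_split_amount (amount : Int) (n : Int) : Prop := n ≠ 0
instance (amount : Int) (n : Int) : Decidable (Pre_split_amount amount n) := by unfold Pre_split_amount; infer_instance
def pvWitness_split_amount : Int × Int := (7, 3)

def Spec_split_amount (amount : Int) (n : Int) (out : List Int) : Prop := out = split_amount_alt amount n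
instance (amount : Int) (n : Int) (out : List Int) : Decidable (Spec_split_amount amount n out) := by unfold Spec_split_amount; infer_instance

-- ===== CLAIM (what is proved, stated in full; the proofs are below) =====
def Claim_equal_split_amount : Prop := ∀ (amount : Int) (n : Int), Dom_split_amount amount n → Pre_split_amount amount n → Spec_split_amount amount n (split_amount amount n)

-- ===== LEMMAS AND PROOFS =====

-- a replicate block absorbs an equal element pushed past it
lemma replicate_shift (m : Nat) (a : Int) (l : List Int) :
    List.replicate m a ++ a :: l = a :: (List.replicate m a ++ l) := by
  induction m with
  | zero => simp
  | succ k ih => simp [List.replicate_succ, ih]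

-- A's loop over any list of length k prepends: first min(remain, k) bumped portions (while the
-- remainder lasts), then plain ones; the reversed accumulator therefore reads plain-then-bumped.
lemma foldl_splitStepA (portion : Int) (l : List Int) (acc : List Int) (r : Int) :
    (l.foldl (fun st _ => splitStepA portion st) (acc, r)).1 =
      List.replicate (l.length - min r.toNat l.length) portion
        ++ List.replicate (min r.toNat l.length) (portion + 1) ++ acc := by
  induction l generalizing acc r with
  | nil => simp
  | cons x xs ih =>
    rw [List.foldl_cons]
    by_cases hr : r ≥ 1
    · have hs : splitStepA portion (acc, r) = ((portion + 1) :: acc, r - 1) := by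
        simp [splitStepA, hr]
      rw [hs, ih]
      have h1 : min r.toNat (x :: xs).length = min (r - 1).toNat xs.length + 1 := by
        simp only [List.length_cons]; omega
      have h2 : (x :: xs).length - min r.toNat (x :: xs).length
          = xs.length - min (r - 1).toNat xs.length := by
        simp only [List.length_cons]; omega
      rw [h1,
        show (x :: xs).length - (min (r - 1).toNat xs.length + 1)
            = xs.length - min (r - 1).toNat xs.length from by
          have := Nat.min_le_right (r - 1).toNat xs.length
          simp only [List.length_cons]; omega,
        List.replicate_succ]
      simp only [List.cons_append, List.append_assoc]
      rw [replicate_shift]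
    · have hs : splitStepA portion (acc, r) = (portion :: acc, r) := by
        simp [splitStepA, hr]
      rw [hs, ih]
      have h0 : r.toNat = 0 := by omega
      simp only [h0, Nat.zero_min, Nat.sub_zero, List.length_cons, List.replicate_zero,
        List.append_nil, List.replicate_succ']
      simp
  
-- B's loop computes the two-block closed form: given amount = q*k + r with 0 ≤ r and
-- (r < k or r = 0), it emits r copies of q+1 followed by k-r copies of q (after acc.reverse).
lemma splitLoopB_closed (k : Nat) : ∀ (q r : Int) (acc : List Int), 0 ≤ r → (r < (k : Int) ∨ r = 0) →
    splitLoopB (q * k + r) k acc =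
      acc.reverse ++ List.replicate r.toNat (q + 1) ++ List.replicate (k - r.toNat) q := by
  induction k with
  | zero =>
    intro q r acc h0 hc
    have hr : r = 0 := by omega
    rw [splitLoopB]
    simp [hr]
  | succ k ih =>
    intro q r acc h0 hc
    have hpos : (0 : Int) < (k + 1 : Nat) := by exact_mod_cast Nat.succ_pos k
    rw [splitLoopB]
    have hnle : ¬ ((k + 1 : Nat) : Int) ≤ 0 := by omega
    simp only [hnle, if_false]
    by_cases hr1 : r ≥ 1
    · have hrk : r < ((k + 1 : Nat) : Int) := by
        rcases hc with h | h
        · exact h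
        · omega
      -- first = q + 1 : ceiling of (q*(k+1)+r)/(k+1) with 0 < r < k+1
      have hfirst : -(PySem.Int.floordiv (-(q * ((k + 1 : Nat) : Int) + r)) ((k + 1 : Nat) : Int)) = q + 1 := by
        rw [PySem.Int.neg_floordiv_neg_eq_iff_of_pos hpos]
        push_cast at hrk ⊢
        constructor <;> nlinarith
      rw [hfirst]
      have harg : q * ((k + 1 : Nat) : Int) + r - (q + 1) = q * (k : Int) + (r - 1) := by
        push_cast; ring
      have hn1 : ((k + 1 : Nat) : Int) - 1 = (k : Int) := by push_cast; ring
      rw [harg, hn1, ih q (r - 1) _ (by omega) (by omega)]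
      have ht : r.toNat = (r - 1).toNat + 1 := by omega
      rw [ht, List.replicate_succ,
        show k + 1 - ((r - 1).toNat + 1) = k - (r - 1).toNat from by omega]
      simp
    · have hr0 : r = 0 := by omega
      have hfirst : -(PySem.Int.floordiv (-(q * ((k + 1 : Nat) : Int) + r)) ((k + 1 : Nat) : Int)) = q := by
        rw [PySem.Int.neg_floordiv_neg_eq_iff_of_pos hpos]
        push_cast
        constructor <;> nlinarith [hr0, hpos]
      rw [hfirst]
      have harg : q * ((k + 1 : Nat) : Int) + r - q = q * (k : Int) + 0 := by
        rw [hr0]; push_cast; ring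
      have hn1 : ((k + 1 : Nat) : Int) - 1 = (k : Int) := by push_cast; ring
      rw [harg, hn1, ih q 0 _ le_rfl (Or.inr rfl)]
      rw [hr0]
      simp [List.replicate_succ]

-- ===== VERDICT (by name: the statement is the Claim_ definition above) =====
theorem split_amount_spec : Claim_equal_split_amount := by
  intro amount n _ hn
  unfold Spec_split_amount split_amount split_amount_alt
  rw [PySem.List.pyRange_one]
  simp only [foldl_splitStepA]
  set p := PySem.Int.floordiv amount n with hp
  set r := PySem.Int.mod amount n with hrm
  simp only [List.length_map, List.length_range, List.append_nil, sub_zero]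
  rcases lt_or_gt_of_ne hn with hneg | hpos
  · have hb := PySem.Int.mod_neg_bounds amount hneg
    have h1 : r.toNat = 0 := by omega
    have h3 : n.toNat = 0 := by omega
    rw [splitLoopB]
    simp [h1, h3, show n ≤ 0 by omega]
  · have h0 : 0 ≤ r := PySem.Int.mod_nonneg amount hpos
    have hlt : r < n := PySem.Int.mod_lt amount hpos
    have hid : p * n + r = amount := by
      rw [hp, hrm]; exact PySem.Int.floordiv_mul_add_mod amount n
    have hn' : ((n.toNat : Int)) = n := by omega
    have hB := splitLoopB_closed n.toNat p r [] h0 (by left; omega)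
    rw [hn', hid] at hB
    rw [hB]
    have h1 : min r.toNat n.toNat = r.toNat := by omega
    rw [h1]
    simp [List.reverse_append]
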